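-- pv_equiv track=rewrite | github.com/bogdanbabych/p1020pipecwb | src/resources/graphonolev-v09/md070crosslevenshteinPhonV09o.py | findRanks
-- ===== SOURCE A (Python) =====
-- def findRanks(TSearchKey, DCognates, LSortKeys): # by which values we sort the keys:
--     LLSortCog = []
--     for el in LSortKeys: # list of key numbers by which to sort the list
--         LSortCog = []
--         ICogRank = 0
--         APrev = -1
--         KeyFound = False
--         for TKey, TVals in sorted(DCognates.items(), reverse=False, key=lambda k: k[1][el]):
--             if ((TVals[el] != APrev) and (KeyFound == True)): # break if new rank is reached
--                 # ICogRank += 1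
--                 break
--             if ((TVals[el] != APrev) and (KeyFound == False)): # add one if not found yet
--                 ICogRank += 1
--             if TSearchKey == TKey:
--                 KeyFound = True
--             APrev = TVals[el]
--             LSortCog.append((ICogRank, TKey, TVals))
--
--         ILenLSortCog = len(LSortCog)
--         LLSortCog.append((ICogRank, ILenLSortCog, LSortCog)) # list of sorted lists of cognates
--     return LLSortCog
-- ===== SOURCE B (Python) =====
-- def findRanks(TSearchKey, DCognates, LSortKeys):
--     LLSortCog = []
--     for el in LSortKeys:
--         items = sorted(DCognates.items(), key=lambda kv: kv[1][el])
--         # dense ranks, +1 on each value change; the previous value starts at -1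
--         # (the function's ranking convention: a lowest group of value -1 keeps rank 0)
--         ranked = []
--         rank = 0
--         prev = -1
--         for key, vals in items:
--             v = vals[el]
--             if v != prev:
--                 rank += 1
--                 prev = v
--             ranked.append((rank, key, vals))
--         target = next((r for r, k, _ in ranked if k == TSearchKey), rank)
--         kept = [t for t in ranked if t[0] <= target]
--         LLSortCog.append((target, len(kept), kept))
--     return LLSortCog
-- ===== Notes on version B (the rewrite author's own statement) =====
-- stated objective: alternative
-- what changed: A's single stateful scan with a KeyFound flag and an early break is replaced by a total dense-ranking pass over the sorted items, then a rank lookup for the search key (defaulting to the final rank) and a filter keeping all entries of rank <= target.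
import Mathlib
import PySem

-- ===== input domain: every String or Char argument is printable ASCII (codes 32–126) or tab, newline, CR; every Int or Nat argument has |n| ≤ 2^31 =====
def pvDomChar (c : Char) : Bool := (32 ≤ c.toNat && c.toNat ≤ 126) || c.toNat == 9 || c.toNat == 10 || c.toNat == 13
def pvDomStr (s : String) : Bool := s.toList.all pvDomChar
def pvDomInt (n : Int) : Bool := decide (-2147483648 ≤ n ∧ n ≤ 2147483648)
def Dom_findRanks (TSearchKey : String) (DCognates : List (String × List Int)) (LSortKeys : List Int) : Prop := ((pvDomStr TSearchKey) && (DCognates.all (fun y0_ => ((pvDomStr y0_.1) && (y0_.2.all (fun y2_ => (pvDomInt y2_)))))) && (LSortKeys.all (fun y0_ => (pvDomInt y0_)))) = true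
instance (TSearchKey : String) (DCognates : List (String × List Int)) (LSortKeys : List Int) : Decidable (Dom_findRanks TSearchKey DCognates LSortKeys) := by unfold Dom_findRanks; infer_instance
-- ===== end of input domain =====

-- B replaces A's break-early stateful scan (APrev/KeyFound flags) by a total dense-ranking
-- pass, a rank lookup for the search key and a filter; objective: alternative decomposition,
-- same results (B keeps the function's convention that the previous value starts at -1).


-- ===== PORT A =====
-- A's inner loop: state (APrev, KeyFound, ICogRank); the break becomes stopping the recursion.
def findRanksA_inner (TSearchKey : String) (el : Int) :
    List (String × List Int) → Int → Bool → Int → Int × List (Int × String × List Int)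
  | [], _, _, rank => (rank, [])
  | (k, vals) :: rest, prev, found, rank =>
    let x := PySem.List.pyGetD vals el 0
    if x ≠ prev ∧ found = true then (rank, [])
    else
      let rank' := if x ≠ prev ∧ found = false then rank + 1 else rank
      let found' := found || (TSearchKey == k)
      let r := findRanksA_inner TSearchKey el rest x found' rank'
      (r.1, (rank', k, vals) :: r.2)

def findRanks (TSearchKey : String) (DCognates : List (String × List Int)) (LSortKeys : List Int) : List (Int × Int × (List (Int × String × List Int))) :=
  LSortKeys.map (fun el =>
    let sortedItems := PySem.List.sorted (PySem.Dict.ofList DCognates).items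
        (fun kv => PySem.List.pyGetD kv.2 el 0) false
    let r := findRanksA_inner TSearchKey el sortedItems (-1) false 0
    (r.1, (r.2.length : Int), r.2))

-- ===== PORT B =====
-- B's dense-ranking pass: returns (ranked list, final rank); prev starts at -1 like A's APrev.
def findRanksB_rank (el : Int) :
    List (String × List Int) → Int → Int → List (Int × String × List Int) × Int
  | [], rank, _ => ([], rank)
  | (k, vals) :: rest, rank, prev =>
    let x := PySem.List.pyGetD vals el 0
    if x ≠ prev then
      let r := findRanksB_rank el rest (rank + 1) x
      ((rank + 1, k, vals) :: r.1, r.2)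
    else
      let r := findRanksB_rank el rest rank prev
      ((rank, k, vals) :: r.1, r.2)

def findRanks_alt (TSearchKey : String) (DCognates : List (String × List Int)) (LSortKeys : List Int) : List (Int × Int × (List (Int × String × List Int))) :=
  LSortKeys.map (fun el =>
    let sortedItems := PySem.List.sorted (PySem.Dict.ofList DCognates).items
        (fun kv => PySem.List.pyGetD kv.2 el 0) false
    let rr := findRanksB_rank el sortedItems 0 (-1)
    let target := ((rr.1.find? (fun t => t.2.1 == TSearchKey)).map (·.1)).getD rr.2
    let kept := rr.1.filter (fun t => t.1 ≤ target)
    (target, (kept.length : Int), kept))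

-- ===== PRECONDITION & SPEC =====
-- Pre_: every sort index is a valid (possibly negative) Python index into every value list of the
-- dict; otherwise sorted(..., key=lambda k: k[1][el]) raises IndexError in A (and in B alike).
def Pre_findRanks (TSearchKey : String) (DCognates : List (String × List Int)) (LSortKeys : List Int) : Prop :=
  ∀ el ∈ LSortKeys, ∀ kv ∈ (PySem.Dict.ofList DCognates).items, (PySem.List.pyGet? kv.2 el).isSome
instance (TSearchKey : String) (DCognates : List (String × List Int)) (LSortKeys : List Int) : Decidable (Pre_findRanks TSearchKey DCognates LSortKeys) := by unfold Pre_findRanks; infer_instance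
def pvWitness_findRanks : String × (List (String × List Int)) × List Int := ("b", [("a", [1]), ("b", [2])], [0])

def Spec_findRanks (TSearchKey : String) (DCognates : List (String × List Int)) (LSortKeys : List Int) (out : List (Int × Int × (List (Int × String × List Int)))) : Prop := out = findRanks_alt TSearchKey DCognates LSortKeys
instance (TSearchKey : String) (DCognates : List (String × List Int)) (LSortKeys : List Int) (out : List (Int × Int × (List (Int × String × List Int)))) : Decidable (Spec_findRanks TSearchKey DCognates LSortKeys out) := by
  unfold Spec_findRanks
  have h : DecidableEq (Int × Int × (List (Int × String × List Int))) := fun a b => inferInstance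
  infer_instance

-- ===== CLAIM (what is proved, stated in full; the proofs are below) =====
def Claim_equal_findRanks : Prop := ∀ (TSearchKey : String) (DCognates : List (String × List Int)) (LSortKeys : List Int), Dom_findRanks TSearchKey DCognates LSortKeys → Pre_findRanks TSearchKey DCognates LSortKeys → Spec_findRanks TSearchKey DCognates LSortKeys (findRanks TSearchKey DCognates LSortKeys)

-- ===== LEMMAS AND PROOFS =====

-- assemble B's answer from the rank pass (proof-only helper)
def bAsm (TSearchKey : String) (rr : List (Int × String × List Int) × Int) : Int × List (Int × String × List Int) :=
  let target := ((rr.1.find? (fun t => t.2.1 == TSearchKey)).map (·.1)).getD rr.2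
  (target, rr.1.filter (fun t => t.1 ≤ target))

theorem bRank_ranks_ge (el : Int) (L : List (String × List Int)) :
    ∀ (rank prev : Int), ∀ t ∈ (findRanksB_rank el L rank prev).1, rank ≤ t.1 := by
  induction L with
  | nil => intro rank prev t ht; simp [findRanksB_rank] at ht
  | cons hd tl ih =>
    intro rank prev t ht
    obtain ⟨k, vals⟩ := hd
    simp only [findRanksB_rank] at ht
    split at ht <;> simp only [List.mem_cons] at ht <;>
      rcases ht with rfl | ht
    · simp
    · have := ih (rank + 1) (PySem.List.pyGetD vals el 0) t ht; omega
    · simp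
    · exact ih rank prev t ht

theorem bRank_final_ge (el : Int) (L : List (String × List Int)) :
    ∀ (rank prev : Int), rank ≤ (findRanksB_rank el L rank prev).2 := by
  induction L with
  | nil => intro rank prev; simp [findRanksB_rank]
  | cons hd tl ih =>
    intro rank prev
    obtain ⟨k, vals⟩ := hd
    simp only [findRanksB_rank]
    split
    · have := ih (rank + 1) (PySem.List.pyGetD vals el 0); simpa using by omega
    · simpa using ih rank prev

theorem bRank_filter_hi (el : Int) (L : List (String × List Int)) (rank t : Int) (prev : Int)
    (h : t < rank) : (findRanksB_rank el L rank prev).1.filter (fun u => u.1 ≤ t) = [] := by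
  rw [List.filter_eq_nil_iff]
  intro u hu
  have := bRank_ranks_ge el L rank prev u hu
  simp; omega

theorem aInner_found (TSearchKey : String) (el : Int) (L : List (String × List Int)) :
    ∀ (p rank : Int),
      findRanksA_inner TSearchKey el L p true rank
        = (rank, (findRanksB_rank el L rank p).1.filter (fun u => u.1 ≤ rank)) := by
  induction L with
  | nil => intro p rank; simp [findRanksA_inner, findRanksB_rank]
  | cons hd tl ih =>
    intro p rank
    obtain ⟨k, vals⟩ := hd
    simp only [findRanksA_inner, findRanksB_rank]
    by_cases hx : PySem.List.pyGetD vals el 0 = p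
    · rw [hx]
      simp [ih p rank]
    · rw [if_pos (show PySem.List.pyGetD vals el 0 ≠ p ∧ True from ⟨hx, trivial⟩),
        if_pos hx]
      simp [bRank_filter_hi el tl (rank + 1) rank (PySem.List.pyGetD vals el 0) (by omega)]

theorem aInner_main (TSearchKey : String) (el : Int) (L : List (String × List Int)) :
    ∀ (p rank : Int),
      findRanksA_inner TSearchKey el L p false rank
        = bAsm TSearchKey (findRanksB_rank el L rank p) := by
  induction L with
  | nil =>
    intro p rank
    simp [findRanksA_inner, findRanksB_rank, bAsm]
  | cons hd tl ih =>
    intro p rank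
    obtain ⟨k, vals⟩ := hd
    by_cases hx : PySem.List.pyGetD vals el 0 = p
    · -- same value as the previous one: rank unchanged
      simp only [findRanksA_inner, findRanksB_rank, hx]
      rw [if_neg (by simp), if_neg (by simp), if_neg (by simp)]
      by_cases hk : TSearchKey = k
      · -- the search key is here: A switches to found mode
        have hbeq : (k == TSearchKey) = true := by simp [hk]
        rw [show (false || (TSearchKey == k)) = true by simp [hk]]
        rw [aInner_found TSearchKey el tl p rank]
        simp [bAsm, hbeq]
      · have hbeq : (k == TSearchKey) = false := by simp; exact fun h' => hk h'.symm
        rw [show (false || (TSearchKey == k)) = false by simp [hk]]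
        rw [ih p rank]
        have htar : rank ≤ (bAsm TSearchKey (findRanksB_rank el tl rank p)).1 := by
          simp only [bAsm]
          cases hfind : (findRanksB_rank el tl rank p).1.find? (fun t => t.2.1 == TSearchKey) with
          | none => simpa [hfind] using bRank_final_ge el tl rank p
          | some u =>
            have hu := List.mem_of_find?_eq_some hfind
            simpa [hfind] using bRank_ranks_ge el tl rank p u hu
        simp only [bAsm, List.find?_cons, hbeq] at htar ⊢
        simp [htar]
    · -- new value: rank increments
      simp only [findRanksA_inner, findRanksB_rank]
      rw [if_neg (by simp), if_pos (show PySem.List.pyGetD vals el 0 ≠ p ∧ True from ⟨hx, trivial⟩), if_pos hx]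
      by_cases hk : TSearchKey = k
      · have hbeq : (k == TSearchKey) = true := by simp [hk]
        rw [show (false || (TSearchKey == k)) = true by simp [hk]]
        rw [aInner_found TSearchKey el tl (PySem.List.pyGetD vals el 0) (rank + 1)]
        simp [bAsm, hbeq]
      · have hbeq : (k == TSearchKey) = false := by simp; exact fun h' => hk h'.symm
        rw [show (false || (TSearchKey == k)) = false by simp [hk]]
        rw [ih (PySem.List.pyGetD vals el 0) (rank + 1)]
        have htar : rank + 1 ≤ (bAsm TSearchKey (findRanksB_rank el tl (rank + 1) (PySem.List.pyGetD vals el 0))).1 := by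
          simp only [bAsm]
          cases hfind : (findRanksB_rank el tl (rank + 1) (PySem.List.pyGetD vals el 0)).1.find? (fun t => t.2.1 == TSearchKey) with
          | none => simpa [hfind] using bRank_final_ge el tl (rank + 1) (PySem.List.pyGetD vals el 0)
          | some u =>
            have hu := List.mem_of_find?_eq_some hfind
            simpa [hfind] using bRank_ranks_ge el tl (rank + 1) (PySem.List.pyGetD vals el 0) u hu
        simp only [bAsm, List.find?_cons, hbeq] at htar ⊢
        simp [htar]

-- ===== VERDICT (by name: the statement is the Claim_ definition above) =====
theorem findRanks_spec : Claim_equal_findRanks := by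
  intro TSearchKey DCognates LSortKeys hdom hpre
  unfold Spec_findRanks
  unfold findRanks findRanks_alt
  apply List.map_congr_left
  intro el hel
  have hmain := aInner_main TSearchKey el
    (PySem.List.sorted (PySem.Dict.ofList DCognates).items
      (fun kv => PySem.List.pyGetD kv.2 el 0) false) (-1) 0
  simp only [hmain, bAsm]
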